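-- pv_equiv track=rewrite | github.com/JakubDotPy/aoc2023 | day13/part1.py | find_symetry_index
-- ===== SOURCE A (Python) =====
-- import itertools
--
-- def find_symetry_index(lines: list[str]) -> int:
--     for idx, (left, right) in enumerate(itertools.pairwise(lines), start=1):
--         if left != right:
--             continue
--         # possible symetry, fan out and compare
--         right_part = lines[idx:]
--         left_part = lines[:idx]
--         if all(
--             left_cand == right_cand
--             for left_cand, right_cand in zip(reversed(left_part), right_part)
--         ):
--             return idx
--     return 0
-- ===== SOURCE B (Python) =====
-- def find_symetry_index(lines: list[str]) -> int:
--     # Maintain the reversed prefix as a stack and compare it with the suffix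
--     # by a single shared-length prefix comparison per candidate axis.
--     left_rev = lines[:1]
--     rest = lines[1:]
--     idx = 1
--     while left_rev and rest:
--         m = min(len(left_rev), len(rest))
--         if left_rev[:m] == rest[:m]:
--             return idx
--         left_rev = [rest[0]] + left_rev
--         rest = rest[1:]
--         idx += 1
--     return 0
-- ===== Notes on version B (the rewrite author's own statement) =====
-- stated objective: alternative
-- what changed: Replaces the pairwise-precheck plus per-candidate fan-out over fresh slices of the whole list by a single left-to-right sweep that maintains the reversed prefix as a stack and tests each axis with one shared-length prefix comparison.
import Mathlib
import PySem

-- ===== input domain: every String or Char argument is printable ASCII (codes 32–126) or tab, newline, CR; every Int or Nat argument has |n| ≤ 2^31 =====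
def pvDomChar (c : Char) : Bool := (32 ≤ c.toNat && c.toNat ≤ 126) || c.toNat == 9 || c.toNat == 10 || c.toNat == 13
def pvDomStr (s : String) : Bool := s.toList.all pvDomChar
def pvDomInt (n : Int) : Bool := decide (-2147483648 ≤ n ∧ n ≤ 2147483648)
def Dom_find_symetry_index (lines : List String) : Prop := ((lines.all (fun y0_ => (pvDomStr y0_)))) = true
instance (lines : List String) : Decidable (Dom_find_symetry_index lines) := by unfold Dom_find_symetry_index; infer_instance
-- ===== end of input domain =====

-- B replaces A's pairwise precheck + per-axis fan-out over fresh slices by one sweep that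
-- maintains the reversed prefix as a stack and does a single shared-length prefix comparison
-- per axis (objective: alternative decomposition, same asymptotic cost).

-- ===== PORT A =====
-- enumerate(itertools.pairwise(lines), start=1): list of (idx, left, right)
def pvPairwiseEnum : List String → Nat → List (Nat × String × String)
  | x :: y :: rest, i => (i, x, y) :: pvPairwiseEnum (y :: rest) (i + 1)
  | _, _ => []

-- the for-loop body; lines[idx:]/lines[:idx] with idx ≥ 0 and ≤ len are exactly drop/take
def pvALoop (lines : List String) : List (Nat × String × String) → Int
  | [] => 0
  | (idx, left, right) :: ps =>
    if left ≠ right then pvALoop lines ps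
    else
      let right_part := lines.drop idx
      let left_part := lines.take idx
      if ((left_part.reverse.zip right_part).all fun p => p.1 == p.2)
      then (idx : Int) else pvALoop lines ps

def find_symetry_index (lines : List String) : Int :=
  pvALoop lines (pvPairwiseEnum lines 1)

-- ===== PORT B =====
-- the while loop of Source B: left_rev is the reversed prefix, rest the suffix
def pvGoAlt : List String → List String → Int → Int
  | l :: ls, r :: rs, idx =>
      let m := min (l :: ls).length (r :: rs).length
      if (l :: ls).take m == (r :: rs).take m then idx
      else pvGoAlt (r :: l :: ls) rs (idx + 1)
  | _, _, _ => 0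

def find_symetry_index_alt (lines : List String) : Int :=
  pvGoAlt (lines.take 1) (lines.drop 1) 1

-- ===== PRECONDITION & SPEC =====
def Spec_find_symetry_index (lines : List String) (out : Int) : Prop := out = find_symetry_index_alt lines
instance (lines : List String) (out : Int) : Decidable (Spec_find_symetry_index lines out) := by unfold Spec_find_symetry_index; infer_instance

-- ===== CLAIM (what is proved, stated in full; the proofs are below) =====
def Claim_equal_find_symetry_index : Prop := ∀ (lines : List String), Dom_find_symetry_index lines → Spec_find_symetry_index lines (find_symetry_index lines)

-- ===== LEMMAS AND PROOFS =====

-- A's zip-all-equal test equals B's shared-length prefix comparison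
lemma pv_zipall_eq_take (l r : List String) :
    ((l.zip r).all fun p => p.1 == p.2)
      = (l.take (min l.length r.length) == r.take (min l.length r.length)) := by
  induction l generalizing r with
  | nil => cases r <;> simp
  | cons a l ih =>
    cases r with
    | nil => simp
    | cons b r =>
      simp [Nat.succ_min_succ, ih, List.cons_beq_cons]

-- loop invariant: with lines = (p :: pre).reverse ++ xs and i = (p :: pre).length,
-- the remaining A-loop equals B's sweep state (p :: pre, xs, i)
lemma pv_main (xs : List String) : ∀ (pre : List String) (p : String) (i : Nat),
    i = (p :: pre).length →
    pvALoop ((p :: pre).reverse ++ xs) (pvPairwiseEnum (p :: xs) i) = pvGoAlt (p :: pre) xs i := by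
  induction xs with
  | nil => intro pre p i hi; simp [pvPairwiseEnum, pvALoop, pvGoAlt]
  | cons x xs ih =>
    intro pre p i hi
    have hlen : ((p :: pre).reverse).length = i := by simp [hi]
    have hdrop : (((p :: pre).reverse ++ x :: xs).drop i) = x :: xs := by
      rw [← hlen]; exact List.drop_left
    have htake : (((p :: pre).reverse ++ x :: xs).take i) = (p :: pre).reverse := by
      rw [← hlen]; exact List.take_left
    have hrec : pvALoop ((p :: pre).reverse ++ x :: xs) (pvPairwiseEnum (x :: xs) (i + 1))
        = pvGoAlt (x :: p :: pre) xs (i + 1) := by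
      have := ih (p :: pre) x (i + 1) (by simp [hi])
      simpa [List.append_assoc] using this
    rw [pvPairwiseEnum]
    rw [pvALoop]
    simp only [hdrop, htake, List.reverse_reverse, pv_zipall_eq_take]
    rw [pvGoAlt]
    by_cases hpx : p = x
    · subst hpx; simp only [ne_eq, not_true_eq_false, if_false]
      split_ifs with h
      · rfl
      · exact hrec
    · have hm : min (p :: pre).length (x :: xs).length
          = min pre.length xs.length + 1 := by simp [Nat.succ_min_succ]
      have hfalse : ((p :: pre).take (min (p :: pre).length (x :: xs).length)
          == (x :: xs).take (min (p :: pre).length (x :: xs).length)) = false := by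
        rw [hm]
        simp [List.cons_beq_cons, hpx]
      simp only [ne_eq, hpx, not_false_eq_true, if_true, hfalse]
      exact hrec

lemma pv_eq (lines : List String) : find_symetry_index lines = find_symetry_index_alt lines := by
  cases lines with
  | nil => rfl
  | cons h t =>
    have := pv_main t [] h 1 (by simp)
    simpa [find_symetry_index, find_symetry_index_alt] using this

-- ===== VERDICT (by name: the statement is the Claim_ definition above) =====
theorem find_symetry_index_spec : Claim_equal_find_symetry_index := by
  intro lines _
  unfold Spec_find_symetry_index
  exact pv_eq lines
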